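-- pv_equiv track=rewrite | github.com/janhq/VoiceBench | src/models/ichigo_v05.py | convert_ids_to_tokens
-- ===== SOURCE A (Python) =====
-- def convert_ids_to_tokens(id_list):
--     """
--     Convert a list of IDs to a compressed sound token string.
--
--     Args:
--         id_list (list): List of sound IDs
--
--     Returns:
--         str: Formatted string with sound tokens and duration
--     """
--     if not id_list:
--         return "<|sound_start|><|sound_end|>"
--
--     result = ["<|sound_start|>"]
--     i = 0
--
--     while i < len(id_list):
--         current_id = id_list[i]
--         count = 1
--
--         # Count consecutive occurrences of the same ID
--         while i + count < len(id_list) and id_list[i + count] == current_id: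
--             count += 1
--
--         # Add duration token if count > 1
--         if count > 1:
--             result.append(f"<|duration_{str(count).zfill(2)}|>")
--
--         # Add the sound token (each ID separately)
--         result.append(f"<|sound_{str(current_id).zfill(4)}|>")
--
--         # Move index forward
--         i += count
--
--     result.append("<|sound_end|>")
--     return "".join(result)
-- ===== SOURCE B (Python) =====
-- def convert_ids_to_tokens(id_list):
--     """
--     Convert a list of IDs to a compressed sound token string.
--
--     Two-pass decomposition: first run-length-encode the list into
--     (id, count) runs by folding, then render each run to its token string.
--     """
--     runs = []
--     for x in id_list:
--         if runs and runs[-1][0] == x: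
--             runs[-1][1] += 1
--         else:
--             runs.append([x, 1])
--
--     parts = [
--         (f"<|duration_{str(count).zfill(2)}|>" if count > 1 else "")
--         + f"<|sound_{str(current_id).zfill(4)}|>"
--         for current_id, count in runs
--     ]
--     return "<|sound_start|>" + "".join(parts) + "<|sound_end|>"
-- ===== Notes on version B (the rewrite author's own statement) =====
-- stated objective: alternative
-- what changed: Replaced the index-based while loop with a nested counting while by a two-pass decomposition: a fold that run-length-encodes the list into (id,count) runs, followed by a comprehension rendering one token string per run, joined between the sentinels (no index arithmetic, no special empty-list branch).
import Mathlib
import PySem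

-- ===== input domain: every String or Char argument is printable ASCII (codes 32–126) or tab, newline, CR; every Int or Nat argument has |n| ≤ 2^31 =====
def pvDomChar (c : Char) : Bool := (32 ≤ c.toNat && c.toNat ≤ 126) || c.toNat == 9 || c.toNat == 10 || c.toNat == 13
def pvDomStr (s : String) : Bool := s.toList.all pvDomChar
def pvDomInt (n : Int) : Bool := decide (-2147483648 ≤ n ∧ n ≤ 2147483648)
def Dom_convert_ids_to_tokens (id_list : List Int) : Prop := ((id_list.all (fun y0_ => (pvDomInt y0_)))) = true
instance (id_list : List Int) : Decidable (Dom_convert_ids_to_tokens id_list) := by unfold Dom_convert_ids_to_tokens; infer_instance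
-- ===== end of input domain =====

-- B replaces A's index-based while loop (with a nested counting loop) by a two-pass
-- decomposition: a fold that run-length-encodes into (id,count) runs, then a map
-- rendering one token string per run; same output, same cost ("alternative").

-- shared token formatting (both Pythons use the identical f-strings)
def pvDurTok (count : Nat) : String :=
  "<|duration_" ++ PySem.Str.zfill (PySem.Int.toStr (count : Int)) 2 ++ "|>"

def pvSoundTok (id : Int) : String :=
  "<|sound_" ++ PySem.Str.zfill (PySem.Int.toStr id) 4 ++ "|>"

-- ===== PORT A =====
-- inner while: number of leading elements of the suffix equal to current_id
def pvCntA (cur : Int) : List Int → Nat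
  | [] => 0
  | y :: ys => if y = cur then pvCntA cur ys + 1 else 0

-- outer while over the current suffix (i advances by count = 1 + pvCntA)
def pvLoopA : List Int → List String
  | [] => []
  | x :: xs =>
    let count := 1 + pvCntA x xs
    ((if count > 1 then [pvDurTok count] else []) ++ [pvSoundTok x])
      ++ pvLoopA (xs.drop (pvCntA x xs))
termination_by l => l.length
decreasing_by
  simp only [List.length_cons, List.length_drop]; omega

def convert_ids_to_tokens (id_list : List Int) : String :=
  if id_list.isEmpty then "<|sound_start|><|sound_end|>"
  else PySem.Str.join "" (["<|sound_start|>"] ++ pvLoopA id_list ++ ["<|sound_end|>"])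

-- ===== PORT B =====
-- fold step: extend the last run or open a new one
def pvStepB (runs : List (Int × Nat)) (x : Int) : List (Int × Nat) :=
  match runs.getLast? with
  | some (y, c) => if y = x then runs.dropLast ++ [(y, c + 1)] else runs ++ [(x, 1)]
  | none => [(x, 1)]

def pvRunsB (id_list : List Int) : List (Int × Nat) := id_list.foldl pvStepB []

def pvRenderB (r : Int × Nat) : String :=
  (if r.2 > 1 then pvDurTok r.2 else "") ++ pvSoundTok r.1

def convert_ids_to_tokens_alt (id_list : List Int) : String :=
  "<|sound_start|>" ++ PySem.Str.join "" ((pvRunsB id_list).map pvRenderB) ++ "<|sound_end|>"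

-- ===== PRECONDITION & SPEC =====
def Spec_convert_ids_to_tokens (id_list : List Int) (out : String) : Prop := out = convert_ids_to_tokens_alt id_list
instance (id_list : List Int) (out : String) : Decidable (Spec_convert_ids_to_tokens id_list out) := by unfold Spec_convert_ids_to_tokens; infer_instance

-- ===== CLAIM (what is proved, stated in full; the proofs are below) =====
def Claim_equal_convert_ids_to_tokens : Prop := ∀ (id_list : List Int), Dom_convert_ids_to_tokens id_list → Spec_convert_ids_to_tokens id_list (convert_ids_to_tokens id_list)

-- ===== LEMMAS AND PROOFS =====

-- recursive run-length encoding mirroring A's outer loop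
def pvRleA : List Int → List (Int × Nat)
  | [] => []
  | x :: xs => (x, 1 + pvCntA x xs) :: pvRleA (xs.drop (pvCntA x xs))
termination_by l => l.length
decreasing_by
  simp only [List.length_cons, List.length_drop]; omega

lemma foldl_pvStepB (l : List Int) (acc : List (Int × Nat)) (x : Int) (c : Nat) :
    l.foldl pvStepB (acc ++ [(x, c)])
      = acc ++ (x, c + pvCntA x l) :: pvRleA (l.drop (pvCntA x l)) := by
  induction l generalizing acc x c with
  | nil => simp [pvCntA, pvRleA]
  | cons y ys ih =>
    simp only [List.foldl_cons, pvStepB, List.getLast?_concat, List.dropLast_concat, pvCntA]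
    by_cases h : x = y
    · subst h
      simp only [if_true, List.drop_succ_cons]
      rw [ih acc x (c + 1), Nat.add_assoc, Nat.add_comm 1]
    · have h' : ¬ y = x := fun e => h e.symm
      rw [if_neg h, if_neg h', ih (acc ++ [(x, c)]) y 1, List.append_assoc]
      simp [pvRleA]

lemma pvRunsB_eq (l : List Int) : pvRunsB l = pvRleA l := by
  cases l with
  | nil => simp [pvRunsB, pvRleA]
  | cons x xs =>
    have e : pvRunsB (x :: xs) = List.foldl pvStepB ([] ++ [(x, 1)]) xs := rfl
    rw [e, foldl_pvStepB, pvRleA]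
    simp

-- A's emitted pieces per run
def pvPieces (r : Int × Nat) : List String :=
  (if r.2 > 1 then [pvDurTok r.2] else []) ++ [pvSoundTok r.1]

lemma pvLoopA_eq (l : List Int) : pvLoopA l = (pvRleA l).flatMap pvPieces := by
  induction l using pvLoopA.induct with
  | case1 => simp [pvLoopA, pvRleA]
  | case2 x xs ih =>
    rw [pvLoopA, pvRleA]
    simp only [List.flatMap_cons, ih, pvPieces]

lemma join_empty_flatten (L : List (List Char)) :
    PySem.Chars.join [] L = L.flatten := by
  induction L with
  | nil => simp [PySem.Chars.join_nil]
  | cons p rest ih =>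
    cases rest with
    | nil => simp [PySem.Chars.join_singleton]
    | cons q r =>
      rw [PySem.Chars.join_cons_cons, List.flatten_cons, ← ih]
      simp

lemma flat_pieces (R : List (Int × Nat)) :
    ((R.flatMap pvPieces).map String.toList).flatten
      = ((R.map pvRenderB).map String.toList).flatten := by
  induction R with
  | nil => simp
  | cons r rest ih =>
    simp only [List.flatMap_cons, List.map_cons, List.map_append, List.flatten_append,
      List.flatten_cons, ih, pvPieces, pvRenderB]
    by_cases h : r.2 > 1 <;> simp [h, String.toList_append]

-- ===== VERDICT (by name: the statement is the Claim_ definition above) =====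
theorem convert_ids_to_tokens_spec : Claim_equal_convert_ids_to_tokens := by
  intro id_list _
  show convert_ids_to_tokens id_list = convert_ids_to_tokens_alt id_list
  cases id_list with
  | nil => decide
  | cons x xs =>
    rw [convert_ids_to_tokens, convert_ids_to_tokens_alt, if_neg (by simp)]
    rw [pvLoopA_eq, pvRunsB_eq]
    apply String.toList_injective
    simp only [PySem.Str.toList_join, String.toList_append, List.map_append, List.map_cons,
      List.map_nil]
    have hnil : ("" : String).toList = [] := rfl
    rw [hnil, join_empty_flatten, join_empty_flatten]
    simp only [List.flatten_append, List.flatten_cons, List.flatten_nil,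
      List.append_nil]
    rw [flat_pieces]
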